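-- pv_equiv track=rewrite | github.com/JordiSod/bright_toast | brightapp.py | basic_cleaning
-- ===== SOURCE A (Python) =====
-- import string
--
-- def basic_cleaning(sentence):
--     '''
--     Preprocess user input to send it to the api that houses the model.
--     '''
--
--     sentence = sentence.lower()
--     sentence = ''.join(char for char in sentence if not char.isdigit())
--
--     for punctuation in string.punctuation:
--         sentence = sentence.replace(punctuation, '')
--
--     sentence = sentence.strip()
--     sentence = sentence.replace(" ", "_" )
--
--     return sentence
-- ===== SOURCE B (Python) =====
-- import string
--
-- def basic_cleaning(sentence):
--     punct = set(string.punctuation)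
--     cleaned = ''.join(c for c in sentence.lower()
--                       if not c.isdigit() and c not in punct)
--     return cleaned.strip().replace(" ", "_")
-- ===== Notes on version B (the rewrite author's own statement) =====
-- stated objective: simpler
-- what changed: Replaces A's 32-iteration punctuation replace loop (a whole-string scan per punctuation character) with a single filtering pass over the lowered string using one set-membership test.
import Mathlib
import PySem

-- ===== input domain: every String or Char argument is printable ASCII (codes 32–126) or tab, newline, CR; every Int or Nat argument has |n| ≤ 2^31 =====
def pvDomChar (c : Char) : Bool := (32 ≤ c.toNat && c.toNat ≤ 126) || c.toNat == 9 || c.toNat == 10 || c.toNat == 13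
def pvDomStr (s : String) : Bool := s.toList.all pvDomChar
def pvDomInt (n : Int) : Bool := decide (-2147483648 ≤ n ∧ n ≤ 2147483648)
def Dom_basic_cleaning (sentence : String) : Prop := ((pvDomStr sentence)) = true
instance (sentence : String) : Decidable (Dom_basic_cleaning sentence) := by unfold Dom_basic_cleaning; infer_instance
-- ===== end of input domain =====

-- B replaces A's 32-iteration punctuation replace loop by one filtering pass over the
-- lowered string (objective: simpler); return values agree on all inputs.

-- string.punctuation
def pvPunct : List Char := "!\"#$%&'()*+,-./:;<=>?@[\\]^_`{|}~".toList

-- ===== PORT A =====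
def basic_cleaning (sentence : String) : String :=
  -- sentence = sentence.lower()
  let s1 := PySem.Str.lower sentence
  -- sentence = ''.join(char for char in sentence if not char.isdigit())
  let s2 := String.ofList (s1.toList.filter (fun c => !(PySem.Chars.isdigit c)))
  -- for punctuation in string.punctuation: sentence = sentence.replace(punctuation, '')
  let s3 := pvPunct.foldl (fun s p => PySem.Str.replace s (String.ofList [p]) "") s2
  -- sentence = sentence.strip(); sentence = sentence.replace(" ", "_")
  PySem.Str.replace (PySem.Str.strip s3) " " "_"

-- ===== PORT B =====
def basic_cleaning_alt (sentence : String) : String :=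
  -- punct = set(string.punctuation)
  let punct : PySem.Set Char := PySem.Set.ofList pvPunct
  -- cleaned = ''.join(c for c in sentence.lower() if not c.isdigit() and c not in punct)
  let cleaned := String.ofList ((PySem.Str.lower sentence).toList.filter
    (fun c => !(PySem.Chars.isdigit c) && !(punct.contains c)))
  -- return cleaned.strip().replace(" ", "_")
  PySem.Str.replace (PySem.Str.strip cleaned) " " "_"

-- ===== PRECONDITION & SPEC =====
def Spec_basic_cleaning (sentence : String) (out : String) : Prop := out = basic_cleaning_alt sentence
instance (sentence : String) (out : String) : Decidable (Spec_basic_cleaning sentence out) := by unfold Spec_basic_cleaning; infer_instance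

-- ===== CLAIM (what is proved, stated in full; the proofs are below) =====
def Claim_equal_basic_cleaning : Prop := ∀ (sentence : String), Dom_basic_cleaning sentence → Spec_basic_cleaning sentence (basic_cleaning sentence)

-- ===== LEMMAS AND PROOFS =====

-- replacing a single character with the empty string is filtering it out
theorem replace_go_single (p : Char) :
    ∀ (fuel : Nat) (l acc : List Char), l.length ≤ fuel →
      PySem.Chars.replace.go [p] [] fuel l acc = acc.reverse ++ l.filter (fun c => !(c == p)) := by
  intro fuel
  induction fuel with
  | zero =>
    intro l acc h
    have : l = [] := List.eq_nil_of_length_eq_zero (Nat.le_zero.mp h)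
    subst this
    simp [PySem.Chars.replace.go]
  | succ n ih =>
    intro l acc h
    cases l with
    | nil => simp [PySem.Chars.replace.go]
    | cons c t =>
      simp only [PySem.Chars.replace.go]
      by_cases hp : c = p
      · subst hp
        have : List.isPrefixOf [c] (c :: t) = true := by simp [List.isPrefixOf]
        rw [if_pos this]
        have ht : t.length ≤ n := by simpa using Nat.lt_succ_iff.mp (by simpa using h)
        simp [ih _ _ ht]
      · have : List.isPrefixOf [p] (c :: t) = false := by
          simp [List.isPrefixOf]; exact fun hcp => hp hcp.symm
        rw [if_neg (by simp [this])]
        have ht : t.length ≤ n := by simpa using Nat.lt_succ_iff.mp (by simpa using h)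
        rw [ih _ _ ht]
        simp [hp]

theorem replace_single_empty (s : List Char) (p : Char) :
    PySem.Chars.replace s [p] [] = s.filter (fun c => !(c == p)) := by
  simpa using replace_go_single p s.length s []

-- folding single-character deletions over a list of characters is one filter
theorem foldl_replace_filter (ps : List Char) :
    ∀ (s : List Char),
      ps.foldl (fun s p => PySem.Chars.replace s [p] []) s
        = s.filter (fun c => !(ps.contains c)) := by
  induction ps with
  | nil => intro s; simp
  | cons p t ih =>
    intro s
    simp only [List.foldl_cons]
    rw [replace_single_empty, ih, List.filter_filter]
    apply List.filter_congr
    intro c _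
    by_cases hc : c = p <;> simp [hc]

-- the de-duplicated punctuation set is the punctuation list itself
theorem set_ofList_punct : PySem.Set.ofList pvPunct = pvPunct := by decide

theorem cleaned_eq (s : List Char) :
    pvPunct.foldl (fun s p => PySem.Chars.replace s [p] [])
        (s.filter (fun c => !(PySem.Chars.isdigit c)))
      = s.filter (fun c => !(PySem.Chars.isdigit c) && !((PySem.Set.ofList pvPunct).contains c)) := by
  rw [foldl_replace_filter, List.filter_filter, set_ofList_punct]
  apply List.filter_congr
  intro c _
  simp [PySem.Set.contains, Bool.and_comm]

-- lift A's per-character replace loop from String to List Char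
theorem foldl_replace_toList (ps : List Char) :
    ∀ (s : String),
      (ps.foldl (fun s p => PySem.Str.replace s (String.ofList [p]) "") s).toList
        = ps.foldl (fun s p => PySem.Chars.replace s [p] []) s.toList := by
  induction ps with
  | nil => intro s; rfl
  | cons p t ih =>
    intro s
    simp [List.foldl_cons, ih, PySem.Str.toList_replace]

-- ===== VERDICT (by name: the statement is the Claim_ definition above) =====
theorem basic_cleaning_spec : Claim_equal_basic_cleaning := by
  intro sentence _
  unfold Spec_basic_cleaning basic_cleaning basic_cleaning_alt
  apply congrArg (fun t => PySem.Str.replace (PySem.Str.strip t) " " "_")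
  apply String.ext
  rw [foldl_replace_toList]
  simp only [String.toList_ofList]
  exact cleaned_eq _
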